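-- pv_equiv track=rewrite | github.com/karthik-bandaru/Python-Basics | 35_sort_evenonlyy.py | result
-- ===== SOURCE A (Python) =====
-- def result(arr):
--     even_nums = sorted([i for i in arr if i%2 == 0])
--     res = []
--     even_index = 0
--     for i in range(len(arr)):
--         if arr[i] % 2 == 0:
--             res.append(even_nums[even_index])
--             even_index += 1
--         else:
--             res.append(arr[i])
--     return res
-- ===== SOURCE B (Python) =====
-- def result(arr):
--     pool = [x for x in arr if x % 2 == 0]
--     out = []
--     for x in arr:
--         if x % 2 != 0:
--             out.append(x)
--         else:
--             m = min(pool)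
--             pool.remove(m)
--             out.append(m)
--     return out
-- ===== Notes on version B (the rewrite author's own statement) =====
-- stated objective: alternative
-- what changed: B never sorts: it keeps the multiset of even values in a pool and fills each even slot by repeated minimum extraction (selection), instead of A's presorted even list consumed by an index counter.
import Mathlib
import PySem

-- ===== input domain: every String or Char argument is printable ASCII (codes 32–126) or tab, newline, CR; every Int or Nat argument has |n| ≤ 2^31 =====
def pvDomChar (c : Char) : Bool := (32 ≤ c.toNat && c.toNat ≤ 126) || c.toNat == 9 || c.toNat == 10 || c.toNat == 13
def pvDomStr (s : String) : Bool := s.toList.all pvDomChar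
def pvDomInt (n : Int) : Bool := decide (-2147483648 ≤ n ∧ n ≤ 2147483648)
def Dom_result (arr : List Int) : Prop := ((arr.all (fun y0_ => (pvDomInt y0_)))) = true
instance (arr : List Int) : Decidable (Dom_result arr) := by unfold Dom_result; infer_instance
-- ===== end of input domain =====

-- B replaces A's presort-then-consume pass by selection: it keeps the even values in a
-- pool and fills each even slot with the pool's minimum, removed as it is used; no sort,
-- alternative structure (O(n^2) instead of O(n log n)). Return values only; neither
-- version mutates its argument.

-- ===== PORT A =====
-- even_nums[even_index] is read with pyGetD (default 0): even_index never exceeds the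
-- number of evens, so the default is never used and the read is exact.
def result (arr : List Int) : List Int :=
  let even_nums := PySem.List.sorted (arr.filter (fun i => PySem.Int.mod i 2 == 0)) (fun x => x) false
  let st := (PySem.List.pyRange 0 (PySem.List.len arr) 1).foldl
    (fun (st : List Int × Nat) i =>
      let x := PySem.List.pyGetD arr i 0
      if PySem.Int.mod x 2 == 0 then
        (st.1 ++ [PySem.List.pyGetD even_nums (st.2 : Int) 0], st.2 + 1)
      else
        (st.1 ++ [x], st.2))
    (([] : List Int), (0 : Nat))
  st.1

-- ===== PORT B =====
-- min(pool) on an empty pool would raise ValueError in Python; the pool always holds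
-- every not-yet-used even value, so that branch is unreachable (left as identity here).
def result_alt (arr : List Int) : List Int :=
  let st := arr.foldl
    (fun (st : List Int × List Int) x =>
      if PySem.Int.mod x 2 != 0 then
        (st.1 ++ [x], st.2)
      else
        match PySem.List.min? st.2 (fun y => y) with
        | none => st                                   -- unreachable: Python would raise
        | some m => (st.1 ++ [m], (PySem.List.remove? st.2 m).getD st.2))
    (([] : List Int), arr.filter (fun x => PySem.Int.mod x 2 == 0))
  st.1

-- ===== PRECONDITION & SPEC =====
def Spec_result (arr : List Int) (out : List Int) : Prop := out = result_alt arr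
instance (arr : List Int) (out : List Int) : Decidable (Spec_result arr out) := by unfold Spec_result; infer_instance

-- ===== CLAIM (what is proved, stated in full; the proofs are below) =====
def Claim_equal_result : Prop := ∀ (arr : List Int), Dom_result arr → Spec_result arr (result arr)

-- ===== LEMMAS AND PROOFS =====

-- the even test used by both programs
def pvEven (x : Int) : Bool := PySem.Int.mod x 2 == 0

-- canonical replacement: walk the list, consuming `es` at even entries
def pvConv : List Int → List Int → List Int
  | [], _ => []
  | x :: xs, es =>
      if pvEven x then
        match es with
        | [] => x :: pvConv xs []          -- unreachable when es covers all evens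
        | e :: es' => e :: pvConv xs es'
      else x :: pvConv xs es

-- indexed variant matching A's even_index
def pvRepl (es : List Int) : List Int → Nat → List Int
  | [], _ => []
  | x :: xs, k =>
      if pvEven x then PySem.List.pyGetD es (k : Int) 0 :: pvRepl es xs (k + 1)
      else x :: pvRepl es xs k

-- selection sort by repeated first-minimum extraction, with fuel
def pvSelF : Nat → List Int → List Int
  | 0, _ => []
  | n + 1, l =>
      match PySem.List.min? l (fun y => y) with
      | none => []
      | some m => m :: pvSelF n ((PySem.List.remove? l m).getD l)

-- B's walk: replace each even entry by the pool's minimum, removing it from the pool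
def pvSel : List Int → List Int → List Int
  | [], _ => []
  | x :: xs, pool =>
      if pvEven x then
        match PySem.List.min? pool (fun y => y) with
        | none => pvSel xs pool
        | some m => m :: pvSel xs ((PySem.List.remove? pool m).getD pool)
      else x :: pvSel xs pool

-- A's fold, with accumulator and counter generalized
lemma pvFoldA (es : List Int) (xs : List Int) (acc : List Int) (k : Nat) :
    (xs.foldl
      (fun (st : List Int × Nat) x =>
        if PySem.Int.mod x 2 == 0 then
          (st.1 ++ [PySem.List.pyGetD es (st.2 : Int) 0], st.2 + 1)
        else (st.1 ++ [x], st.2))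
      (acc, k)).1 = acc ++ pvRepl es xs k := by
  induction xs generalizing acc k with
  | nil => simp [pvRepl]
  | cons x xs ih =>
      by_cases h : pvEven x
      · have h' : (PySem.Int.mod x 2 == 0) = true := h
        simp only [List.foldl_cons, h', if_pos, ih, pvRepl, h]
        simp
      · have h' : ¬ ((PySem.Int.mod x 2 == 0) = true) := by simpa [pvEven] using h
        simp only [List.foldl_cons, if_neg h', ih, pvRepl, h]
        simp

-- B's fold, with accumulator generalized
lemma pvFoldB (xs : List Int) (acc pool : List Int) :
    (xs.foldl
      (fun (st : List Int × List Int) x =>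
        if PySem.Int.mod x 2 != 0 then
          (st.1 ++ [x], st.2)
        else
          match PySem.List.min? st.2 (fun y => y) with
          | none => st
          | some m => (st.1 ++ [m], (PySem.List.remove? st.2 m).getD st.2))
      (acc, pool)).1 = acc ++ pvSel xs pool := by
  induction xs generalizing acc pool with
  | nil => simp [pvSel]
  | cons x xs ih =>
      by_cases h : pvEven x
      · have h' : (PySem.Int.mod x 2 != 0) = false := by
          simp only [pvEven] at h
          simp only [bne, h, Bool.not_true]
        simp only [List.foldl_cons, h', Bool.false_eq_true, if_false]
        cases hm : PySem.List.min? pool (fun y => y) with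
        | none =>
            rw [ih]
            simp only [pvSel, h, if_pos, hm]
        | some m =>
            rw [ih]
            simp only [pvSel, h, if_pos, hm]
            simp
      · have h' : (PySem.Int.mod x 2 != 0) = true := by
          simp only [pvEven, Bool.not_eq_true] at h
          simp only [bne, h, Bool.not_false]
        simp only [List.foldl_cons, h', if_true]
        rw [ih]
        simp only [pvSel, h, Bool.false_eq_true, if_false]
        simp

-- A's indexed consumption equals the canonical replacement
lemma pvRepl_eq_conv (es : List Int) (xs : List Int) (k : Nat)
    (hk : k + (xs.filter pvEven).length ≤ es.length) :
    pvRepl es xs k = pvConv xs (es.drop k) := by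
  induction xs generalizing k with
  | nil => rfl
  | cons x xs ih =>
      by_cases h : pvEven x
      · have hklt : k < es.length := by
          simp [h] at hk; omega
        have hdrop : es.drop k = es[k] :: es.drop (k + 1) := List.drop_eq_getElem_cons hklt
        simp only [pvRepl, h, if_pos]
        rw [PySem.List.pyGetD_natCast]
        have hget : es.getD k 0 = es[k] := List.getD_eq_getElem es 0 hklt
        rw [hget, ih (k + 1) (by simp [h] at hk ⊢; omega), hdrop]
        simp [pvConv, h]
      · simp only [pvRepl, h]
        rw [ih k (by simp [h] at hk ⊢; omega)]
        simp [pvConv, h]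

-- fueled selection: permutation of the pool
lemma pvSelF_perm (n : Nat) (l : List Int) (hn : l.length ≤ n) :
    (pvSelF n l).Perm l := by
  induction n generalizing l with
  | zero =>
      have : l = [] := List.eq_nil_of_length_eq_zero (by omega)
      subst this; simp [pvSelF]
  | succ n ih =>
      cases hm : PySem.List.min? l (fun y => y) with
      | none =>
          have : l = [] := (PySem.List.min?_eq_none_iff _ _).mp hm
          subst this; simp [pvSelF, hm]
      | some m =>
          have hmem : m ∈ l := PySem.List.min?_mem hm
          have hrem : PySem.List.remove? l m = some (l.erase m) :=
            PySem.List.remove?_eq_some_erase _ _ hmem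
          have hlen : (l.erase m).length ≤ n := by
            have := List.length_erase_of_mem hmem
            omega
          have hperm : (pvSelF n (l.erase m)).Perm (l.erase m) := ih _ hlen
          simp only [pvSelF, hm, hrem, Option.getD_some]
          exact (hperm.cons m).trans (List.perm_cons_erase hmem).symm

-- fueled selection: sorted ascending
lemma pvSelF_sorted (n : Nat) (l : List Int) (hn : l.length ≤ n) :
    (pvSelF n l).Pairwise (· ≤ ·) := by
  induction n generalizing l with
  | zero => simp [pvSelF]
  | succ n ih =>
      cases hm : PySem.List.min? l (fun y => y) with
      | none => simp [pvSelF, hm]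
      | some m =>
          have hmem : m ∈ l := PySem.List.min?_mem hm
          have hrem : PySem.List.remove? l m = some (l.erase m) :=
            PySem.List.remove?_eq_some_erase _ _ hmem
          have hlen : (l.erase m).length ≤ n := by
            have := List.length_erase_of_mem hmem
            omega
          simp only [pvSelF, hm, hrem, Option.getD_some]
          refine List.pairwise_cons.mpr ⟨?_, ih _ hlen⟩
          intro y hy
          have hy' : y ∈ l.erase m := ((pvSelF_perm n (l.erase m) hlen).mem_iff).mp hy
          exact PySem.List.min?_isMin hm y (List.mem_of_mem_erase hy')

-- selection by repeated minimum equals the library sort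
lemma pvSelF_eq_sorted (l : List Int) :
    pvSelF l.length l = PySem.List.sorted l (fun x => x) false := by
  have hperm : (pvSelF l.length l).Perm (PySem.List.sorted l (fun x => x) false) :=
    (pvSelF_perm l.length l le_rfl).trans (PySem.List.sorted_perm l (fun x => x) false).symm
  have hs1 : (pvSelF l.length l).Pairwise (· ≤ ·) := pvSelF_sorted l.length l le_rfl
  have hs2 : (PySem.List.sorted l (fun x => x) false).Pairwise (· ≤ ·) :=
    PySem.List.sorted_pairwise l (fun x => x)
  exact hperm.eq_of_pairwise' hs1 hs2

-- B's walk equals the canonical replacement fed the selection-sorted pool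
lemma pvSel_eq_conv (xs : List Int) (pool : List Int)
    (hlen : (xs.filter pvEven).length ≤ pool.length) :
    pvSel xs pool = pvConv xs (pvSelF pool.length pool) := by
  induction xs generalizing pool with
  | nil => rfl
  | cons x xs ih =>
      by_cases h : pvEven x
      · have hpos : 0 < pool.length := by simp [h] at hlen; omega
        obtain ⟨p, ps, rfl⟩ : ∃ p ps, pool = p :: ps := by
          cases pool with
          | nil => simp at hpos
          | cons p ps => exact ⟨p, ps, rfl⟩
        cases hm : PySem.List.min? (p :: ps) (fun y => y) with
        | none => exact absurd ((PySem.List.min?_eq_none_iff _ _).mp hm) (by simp)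
        | some m =>
            have hmem : m ∈ p :: ps := PySem.List.min?_mem hm
            have hrem : PySem.List.remove? (p :: ps) m = some ((p :: ps).erase m) :=
              PySem.List.remove?_eq_some_erase _ _ hmem
            have hlen' : ((p :: ps).erase m).length = ps.length := by
              have := List.length_erase_of_mem hmem; simpa using this
            have hx : (xs.filter pvEven).length ≤ ((p :: ps).erase m).length := by
              simp [h] at hlen; omega
            have hsel : pvSelF (p :: ps).length (p :: ps)
                = m :: pvSelF ps.length ((p :: ps).erase m) := by
              simp [pvSelF, hm, hrem]
            simp only [pvSel, h, if_pos, hm, hrem, Option.getD_some, pvConv, hsel]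
            rw [ih _ hx, hlen']
      · simp only [pvSel, pvConv, h, Bool.false_eq_true, if_false]
        rw [ih pool (by simpa [h] using hlen)]

lemma pvResult_eq_conv (arr : List Int) :
    result arr
      = pvConv arr (PySem.List.sorted (arr.filter pvEven) (fun x => x) false) := by
  have key := PySem.List.foldl_pyRange_pyGetD arr 0
      (fun (st : List Int × Nat) x =>
        if PySem.Int.mod x 2 == 0 then
          (st.1 ++ [PySem.List.pyGetD
              (PySem.List.sorted (arr.filter (fun i => PySem.Int.mod i 2 == 0)) (fun x => x) false)
              (st.2 : Int) 0], st.2 + 1)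
        else (st.1 ++ [x], st.2))
      (([] : List Int), (0 : Nat)) (le_refl (0 : Int))
  beta_reduce at key
  simp only [result]
  rw [key]
  simp only [Int.toNat_zero, List.drop_zero]
  rw [pvFoldA]
  have hlen : (PySem.List.sorted (arr.filter pvEven) (fun x => x) false).length
      = (arr.filter pvEven).length :=
    (PySem.List.sorted_perm (arr.filter pvEven) (fun x => x) false).length_eq
  have hp : (fun i => PySem.Int.mod i 2 == 0) = pvEven := by
    funext i; simp [pvEven]
  rw [hp, pvRepl_eq_conv _ _ 0 (by omega)]
  simp

lemma pvResultAlt_eq_conv (arr : List Int) :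
    result_alt arr
      = pvConv arr (PySem.List.sorted (arr.filter pvEven) (fun x => x) false) := by
  have hp : (fun i => PySem.Int.mod i 2 == 0) = pvEven := by
    funext i; simp [pvEven]
  simp only [result_alt, hp]
  rw [pvFoldB, pvSel_eq_conv arr (arr.filter pvEven) (le_refl _),
      pvSelF_eq_sorted (arr.filter pvEven)]
  simp

-- ===== VERDICT (by name: the statement is the Claim_ definition above) =====
theorem result_spec : Claim_equal_result := by
  intro arr _
  unfold Spec_result
  rw [pvResult_eq_conv, pvResultAlt_eq_conv]
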